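-- pv_equiv track=rewrite | github.com/Kemingjun/Co-Het | Baseline/Util/util.py | code2path_map
-- ===== SOURCE A (Python) =====
-- from typing import List, Dict, Set, Tuple, Any, Union, Optional
--
-- def code2path_map(code: List[int]) -> Dict[int, List[int]]:
--     """
--     Decodes a flat list representation into a path map for each robot.
--     Tasks are separated by '0' (depot).
--     """
--     path_map = {}
--     path = []
--     path_index = 1
--     for task_index, task in enumerate(code):
--         if task == 0:
--             if task_index != 0:
--                 path_map[path_index] = path
--                 path = []
--                 path_index += 1
--             else:
--                 continue
--         else:
--             path.append(task)
--     path_map[path_index] = path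
--     return path_map
-- ===== SOURCE B (Python) =====
-- def code2path_map(code):
--     """Decode flat list into robot path map: drop one optional leading depot zero,
--     then cut the list at zero positions into boundary slices."""
--     body = code[1:] if code and code[0] == 0 else code
--     zeros = [i for i, x in enumerate(body) if x == 0]
--     bounds = [-1] + zeros + [len(body)]
--     return {k: body[lo + 1:hi]
--             for k, (lo, hi) in enumerate(zip(bounds, bounds[1:]), start=1)}
-- ===== Notes on version B (the rewrite author's own statement) =====
-- stated objective: alternative
-- what changed: Replaces A's single stateful pass (dict/current-path/counter mutated per element) by a declarative decomposition: normalize off one leading zero, collect zero positions, and build each path as a boundary slice body[lo+1:hi], enumerated into the dict.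
import Mathlib
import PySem

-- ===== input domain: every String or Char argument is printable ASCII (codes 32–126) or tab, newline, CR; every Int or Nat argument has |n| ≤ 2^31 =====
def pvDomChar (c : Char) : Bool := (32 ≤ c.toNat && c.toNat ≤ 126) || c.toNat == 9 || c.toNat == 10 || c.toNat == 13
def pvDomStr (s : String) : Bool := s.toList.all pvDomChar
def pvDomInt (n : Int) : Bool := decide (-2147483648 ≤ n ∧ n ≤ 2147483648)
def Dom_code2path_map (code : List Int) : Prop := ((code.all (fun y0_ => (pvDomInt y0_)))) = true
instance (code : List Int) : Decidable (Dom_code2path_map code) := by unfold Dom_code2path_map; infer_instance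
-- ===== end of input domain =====

-- B replaces A's single stateful pass by a boundary-slice decomposition (zero positions -> slices); same cost, alternative structure.

-- ===== PORT A =====
-- the body of A's for-loop over enumerate(code), acting on the state (path_map, path, path_index)
def pvStepA (st : PySem.Dict Int (List Int) × List Int × Int) (p : Int × Int) :
    PySem.Dict Int (List Int) × List Int × Int :=
  match st, p with
  | (pm, path, idx), (ti, t) =>
    if t = 0 then
      if ti ≠ 0 then (pm.insert idx path, ([] : List Int), idx + 1) else (pm, path, idx)
    else (pm, path ++ [t], idx)

-- the final 'path_map[path_index] = path; return path_map'
def pvFinishA (st : PySem.Dict Int (List Int) × List Int × Int) : List (Int × List Int) :=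
  (st.1.insert st.2.2 st.2.1).items

def code2path_map (code : List Int) : List (Int × List Int) :=
  pvFinishA ((PySem.List.enumerate code 0).foldl pvStepA (PySem.Dict.empty, [], 1))

-- ===== PORT B =====
def code2path_map_alt (code : List Int) : List (Int × List Int) :=
  let body := if !code.isEmpty && code.headD 0 == 0
              then PySem.List.slice code (some 1) none else code
  let zeros := ((PySem.List.enumerate body 0).filter (fun p => p.2 == 0)).map (·.1)
  let bounds := [(-1 : Int)] ++ zeros ++ [(body.length : Int)]
  (PySem.List.enumerate (bounds.zip (PySem.List.slice bounds (some 1) none)) 1).map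
    (fun q => (q.1, PySem.List.slice body (some (q.2.1 + 1)) (some q.2.2)))

-- ===== PRECONDITION & SPEC =====
def Spec_code2path_map (code : List Int) (out : List (Int × List Int)) : Prop := out = code2path_map_alt code
instance (code : List Int) (out : List (Int × List Int)) : Decidable (Spec_code2path_map code out) := by unfold Spec_code2path_map; infer_instance

-- ===== CLAIM (what is proved, stated in full; the proofs are below) =====
def Claim_equal_code2path_map : Prop := ∀ (code : List Int), Dom_code2path_map code → Spec_code2path_map code (code2path_map code)

-- ===== LEMMAS AND PROOFS =====

-- proof-only reference function: split a list at its zeros into consecutive paths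
def split0 (xs : List Int) : List (List Int) :=
  match xs with
  | [] => [[]]
  | x :: rest =>
    if x = 0 then [] :: split0 rest
    else (x :: (split0 rest).headD []) :: (split0 rest).tail

def pvHeadCons (path : List Int) (l : List (List Int)) : List (List Int) :=
  (path ++ l.headD []) :: l.tail

lemma headCons_nil_split0 (xs : List Int) : pvHeadCons [] (split0 xs) = split0 xs := by
  cases xs with
  | nil => simp [split0, pvHeadCons]
  | cons x rest => simp only [split0]; split_ifs <;> simp [pvHeadCons]

-- ---- A-side: the fold computes split0 of the remaining input (indices ≥ 1) ----
lemma loopA_eq (xs : List Int) : ∀ (n : Int), 1 ≤ n →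
    ∀ (d : PySem.Dict Int (List Int)) (path : List Int) (idx : Int),
    (∀ k ∈ d.keys, k < idx) →
    pvFinishA ((PySem.List.enumerate xs n).foldl pvStepA (d, path, idx))
      = d.items ++ PySem.List.enumerate (pvHeadCons path (split0 xs)) idx := by
  induction xs with
  | nil =>
    intro n hn d path idx hd
    have hc : d.contains idx = false := by
      rw [PySem.Dict.contains_eq_decide_mem_keys]
      simp only [decide_eq_false_iff_not]
      intro h; exact absurd (hd _ h) (lt_irrefl _)
    simp only [PySem.List.enumerate_nil, List.foldl_nil, pvFinishA]
    rw [PySem.Dict.items_insert_of_not_contains _ _ hc]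
    simp [split0, pvHeadCons, PySem.List.enumerate]
  | cons x rest ih =>
    intro n hn d path idx hd
    rw [PySem.List.enumerate_cons, List.foldl_cons]
    by_cases hx : x = 0
    · subst hx
      have hstep : pvStepA (d, path, idx) (n, 0) = (d.insert idx path, [], idx + 1) := by
        simp [pvStepA]; omega
      have hd' : ∀ k ∈ (d.insert idx path).keys, k < idx + 1 := by
        intro k hk
        rcases (PySem.Dict.mem_keys_insert _ _ _ _).mp hk with h | h
        · omega
        · have := hd _ h; omega
      have hc : d.contains idx = false := by
        rw [PySem.Dict.contains_eq_decide_mem_keys]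
        simp only [decide_eq_false_iff_not]
        intro h; exact absurd (hd _ h) (lt_irrefl _)
      rw [hstep, ih (n+1) (by omega) _ _ _ hd',
          PySem.Dict.items_insert_of_not_contains _ _ hc, headCons_nil_split0]
      simp [split0, pvHeadCons, PySem.List.enumerate_cons, List.append_assoc]
    · have hstep : pvStepA (d, path, idx) (n, x) = (d, path ++ [x], idx) := by
        simp [pvStepA, hx]
      rw [hstep, ih (n+1) (by omega) _ _ _ hd]
      simp [split0, pvHeadCons, hx, List.append_assoc]

theorem A_eq_split0 (code : List Int) :
    code2path_map code
      = PySem.List.enumerate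
          (split0 (if !code.isEmpty && code.headD 0 == 0 then code.tail else code)) 1 := by
  cases code with
  | nil =>
    simp only [code2path_map, PySem.List.enumerate_nil, List.foldl_nil, pvFinishA]
    simp [split0, PySem.List.enumerate, PySem.Dict.items_insert_of_not_contains,
          PySem.Dict.empty]
  | cons c rest =>
    by_cases hc : c = 0
    · subst hc
      unfold code2path_map
      rw [PySem.List.enumerate_cons, List.foldl_cons]
      have hstep : pvStepA (PySem.Dict.empty, [], 1) ((0:Int), (0:Int))
          = (PySem.Dict.empty, [], 1) := by simp [pvStepA]
      have h01 : (0 : Int) + 1 = 1 := by norm_num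
      rw [hstep, h01, loopA_eq rest 1 le_rfl _ _ _ (by simp [PySem.Dict.keys_empty])]
      simp [headCons_nil_split0, PySem.Dict.empty]
    · unfold code2path_map
      rw [PySem.List.enumerate_cons, List.foldl_cons]
      have hstep : pvStepA (PySem.Dict.empty, [], 1) ((0:Int), c)
          = (PySem.Dict.empty, [c], 1) := by simp [pvStepA, hc]
      have h01 : (0 : Int) + 1 = 1 := by norm_num
      rw [hstep, h01, loopA_eq rest 1 le_rfl _ _ _ (by simp [PySem.Dict.keys_empty])]
      simp [split0, pvHeadCons, hc, PySem.Dict.empty]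

-- ---- B-side: the boundary slices compute split0 ----
def pvZeros (body : List Int) : List Int :=
  ((PySem.List.enumerate body 0).filter (fun p => p.2 == 0)).map (·.1)

def pvSlices (body : List Int) : List (List Int) :=
  (((([(-1 : Int)] ++ pvZeros body ++ [(body.length : Int)])).zip
      (([(-1 : Int)] ++ pvZeros body ++ [(body.length : Int)]).tail)).map
    (fun q => PySem.List.slice body (some (q.1 + 1)) (some q.2)))

lemma enumerate_shift (xs : List Int) : ∀ s t : Int,
    PySem.List.enumerate xs (s + t) = (PySem.List.enumerate xs s).map (fun p => (p.1 + t, p.2)) := by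
  induction xs with
  | nil => intro s t; simp [PySem.List.enumerate_nil]
  | cons x rest ih =>
    intro s t
    rw [PySem.List.enumerate_cons, PySem.List.enumerate_cons]
    have h : s + t + 1 = (s + 1) + t := by ring
    rw [h, ih]
    simp

lemma zeros_cons (x : Int) (rest : List Int) :
    pvZeros (x :: rest) = (if x = 0 then [(0 : Int)] else []) ++ (pvZeros rest).map (· + 1) := by
  unfold pvZeros
  rw [PySem.List.enumerate_cons]
  have h1 : (1 : Int) = 0 + 1 := by ring
  rw [h1, enumerate_shift]
  rw [List.filter_cons]
  simp only [List.filter_map, List.map_map]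
  split_ifs with h <;> simp_all [Function.comp_def]

lemma zeros_nonneg (body : List Int) : ∀ a ∈ pvZeros body, 0 ≤ a := by
  intro a ha
  unfold pvZeros at ha
  simp only [List.mem_map, List.mem_filter] at ha
  obtain ⟨p, ⟨hp, _⟩, rfl⟩ := ha
  rcases (PySem.List.mem_enumerate_iff _ _ _).mp hp with ⟨k, hk, rfl⟩
  simp

lemma slice_cons_shift (x : Int) (body : List Int) (a b : Int) (ha : -1 ≤ a) (hb : 0 ≤ b) :
    PySem.List.slice (x :: body) (some (a + 1 + 1)) (some (b + 1))
      = PySem.List.slice body (some (a + 1)) (some b) := by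
  rw [PySem.List.slice_toNat _ (by omega) (by omega),
      PySem.List.slice_toNat _ (by omega) hb]
  have h1 : (a + 1 + 1).toNat = (a + 1).toNat + 1 := by omega
  have h2 : (b + 1).toNat = b.toNat + 1 := by omega
  rw [h1, h2]
  simp only [List.drop_succ_cons]
  congr 1
  omega

lemma slice_cons_head (x : Int) (body : List Int) (b : Int) (hb : 0 ≤ b) :
    PySem.List.slice (x :: body) (some ((-1 : Int) + 1)) (some (b + 1))
      = x :: PySem.List.slice body (some ((-1 : Int) + 1)) (some b) := by
  norm_num
  rw [PySem.List.slice_to _ (by omega), PySem.List.slice_to _ hb]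
  have h2 : (b + 1).toNat = b.toNat + 1 := by omega
  simp [h2]

lemma map_slice_shift (x : Int) (body : List Int) (pairs : List (Int × Int))
    (h : ∀ q ∈ pairs, -1 ≤ q.1 ∧ 0 ≤ q.2) :
    (pairs.map (fun q => ((q.1 + 1 : Int), (q.2 + 1 : Int)))).map
        (fun q => PySem.List.slice (x :: body) (some (q.1 + 1)) (some q.2))
      = pairs.map (fun q => PySem.List.slice body (some (q.1 + 1)) (some q.2)) := by
  rw [List.map_map]
  apply List.map_congr_left
  intro q hq
  obtain ⟨h1, h2⟩ := h q hq
  exact slice_cons_shift x body q.1 q.2 h1 h2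

lemma pvSlices_eq_split0 : ∀ body : List Int, pvSlices body = split0 body := by
  intro body
  induction body with
  | nil =>
    simp [pvSlices, pvZeros, split0, PySem.List.enumerate_nil, PySem.List.slice_toNat]
  | cons x rest ih =>
    obtain ⟨s0, s', hs⟩ : ∃ s0 s', pvZeros rest ++ [(rest.length : Int)] = s0 :: s' :=
      List.exists_cons_of_ne_nil (by simp)
    have hsnn : ∀ a ∈ s0 :: s', 0 ≤ a := by
      rw [← hs]
      intro a ha
      rcases List.mem_append.mp ha with h | h
      · exact zeros_nonneg rest a h
      · simp at h; omega
    have hs0 : 0 ≤ s0 := hsnn s0 (by simp)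
    have hzipR : ∀ q ∈ ((-1 : Int) :: s0 :: s').zip (s0 :: s'), -1 ≤ q.1 ∧ 0 ≤ q.2 := by
      intro q hq
      have h1 := List.of_mem_zip hq
      refine ⟨?_, hsnn q.2 h1.2⟩
      rcases List.mem_cons.mp h1.1 with h | h
      · omega
      · have := hsnn q.1 h; omega
    have hIH : (((-1 : Int) :: s0 :: s').zip (s0 :: s')).map
        (fun q => PySem.List.slice rest (some (q.1 + 1)) (some q.2)) = split0 rest := by
      have h := ih
      unfold pvSlices at h
      simp only [List.cons_append, List.nil_append] at h
      rw [hs] at h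
      simpa using h
    have hlen : ((x :: rest).length : Int) = (rest.length : Int) + 1 := by
      push_cast [List.length_cons]; ring
    by_cases hx : x = 0
    · subst hx
      unfold pvSlices
      rw [zeros_cons, if_pos rfl, hlen]
      have hmb : ([(0 : Int)] ++ (pvZeros rest).map (· + 1)) ++ [(rest.length : Int) + 1]
          = ((-1 : Int) + 1) :: ((s0 :: s').map (· + 1)) := by
        rw [← hs]
        simp [List.map_append]
      simp only [List.cons_append, List.nil_append] at hmb ⊢
      rw [hmb]
      simp only [List.tail_cons]
      have hzm : (((-1 : Int) + 1) :: (s0 :: s').map (· + 1)).zip ((s0 :: s').map (· + 1))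
          = (((-1 : Int) :: s0 :: s').zip (s0 :: s')).map (fun q => (q.1 + 1, q.2 + 1)) := by
        have h : ((-1 : Int) + 1) :: (s0 :: s').map (· + 1) = ((-1 : Int) :: s0 :: s').map (· + 1) := by
          simp
        rw [h, List.zip_map]
        rfl
      rw [List.zip_cons_cons, List.map_cons, split0, if_pos rfl]
      refine List.cons_eq_cons.mpr ⟨?_, ?_⟩
      · rw [PySem.List.slice_toNat _ (by omega) (by omega)]
        simp
      · rw [hzm, map_slice_shift 0 rest _ hzipR, hIH]
    · unfold pvSlices
      rw [zeros_cons, if_neg hx, hlen]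
      have hmb : ([] ++ (pvZeros rest).map (· + 1)) ++ [(rest.length : Int) + 1]
          = (s0 :: s').map (· + 1) := by
        rw [← hs]
        simp [List.map_append]
      simp only [List.cons_append, List.nil_append] at hmb ⊢
      rw [hmb]
      simp only [List.map_cons, List.tail_cons]
      have hzm : ((s0 + 1) :: s'.map (· + 1)).zip (s'.map (· + 1))
          = ((s0 :: s').zip s').map (fun q => (q.1 + 1, q.2 + 1)) := by
        have h : (s0 + 1) :: s'.map (· + 1) = (s0 :: s').map (· + 1) := by simp
        rw [h, List.zip_map]
        rfl
      have hzipS : ∀ q ∈ (s0 :: s').zip s', -1 ≤ q.1 ∧ 0 ≤ q.2 := by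
        intro q hq
        have h1 := List.of_mem_zip hq
        exact ⟨by have := hsnn q.1 h1.1; omega, hsnn q.2 (List.mem_cons_of_mem _ h1.2)⟩
      rw [List.zip_cons_cons, List.map_cons, hzm, map_slice_shift x rest _ hzipS]
      rw [split0, if_neg hx]
      have hIH' : PySem.List.slice rest (some ((-1 : Int) + 1)) (some s0)
            :: ((s0 :: s').zip s').map (fun q => PySem.List.slice rest (some (q.1 + 1)) (some q.2))
          = split0 rest := by
        rw [← hIH]
        simp [List.zip_cons_cons]
      refine List.cons_eq_cons.mpr ⟨?_, ?_⟩
      · rw [slice_cons_head x rest s0 hs0, ← hIH']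
        simp
      · rw [← hIH']
        simp
    
lemma enumerate_map {α β : Type} (f : α → β) (xs : List α) : ∀ s : Int,
    (PySem.List.enumerate xs s).map (fun q => (q.1, f q.2)) = PySem.List.enumerate (xs.map f) s := by
  induction xs with
  | nil => intro s; simp [PySem.List.enumerate_nil]
  | cons x rest ih =>
    intro s
    rw [List.map_cons, PySem.List.enumerate_cons, PySem.List.enumerate_cons, List.map_cons, ih]

theorem B_eq_split0 (code : List Int) :
    code2path_map_alt code
      = PySem.List.enumerate
          (split0 (if !code.isEmpty && code.headD 0 == 0 then code.tail else code)) 1 := by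
  unfold code2path_map_alt
  simp only [PySem.List.slice_from_one]
  rw [enumerate_map (fun p : Int × Int => PySem.List.slice
        (if !code.isEmpty && code.headD 0 == 0 then code.tail else code)
        (some (p.1 + 1)) (some p.2))]
  rw [← pvSlices_eq_split0]
  rfl

-- ===== VERDICT (by name: the statement is the Claim_ definition above) =====
theorem code2path_map_spec : Claim_equal_code2path_map := by
  intro code _
  unfold Spec_code2path_map
  rw [A_eq_split0, B_eq_split0]
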